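-- pv_equiv track=rewrite | github.com/olivier-riverain/advent-of-code-2024 | days/adventofcode09.py | createDico
-- ===== SOURCE A (Python) =====
-- def createDico(block):
--     dico = {}
--     for item in block:
--         if item != ".":
--             if item in dico.keys():
--                 dico[item] +=1
--             else:
--                 dico[item] = 1
--     return dico
-- ===== SOURCE B (Python) =====
-- def createDico(block):
--     # Counts each distinct non-dot item by scanning the sequence once per key
--     # (dict.fromkeys keeps first-occurrence order, matching A's insertion order).
--     items = [item for item in dict.fromkeys(block) if item != "."]
--     return {item: block.count(item) for item in items}
-- ===== Notes on version B (the rewrite author's own statement) =====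
-- stated objective: idiomatic
-- what changed: B replaces A's single accumulating dict pass (membership test, then +=1 or =1) by first deduplicating the sequence and then counting each distinct non-dot item with block.count in a comprehension.
import Mathlib
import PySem

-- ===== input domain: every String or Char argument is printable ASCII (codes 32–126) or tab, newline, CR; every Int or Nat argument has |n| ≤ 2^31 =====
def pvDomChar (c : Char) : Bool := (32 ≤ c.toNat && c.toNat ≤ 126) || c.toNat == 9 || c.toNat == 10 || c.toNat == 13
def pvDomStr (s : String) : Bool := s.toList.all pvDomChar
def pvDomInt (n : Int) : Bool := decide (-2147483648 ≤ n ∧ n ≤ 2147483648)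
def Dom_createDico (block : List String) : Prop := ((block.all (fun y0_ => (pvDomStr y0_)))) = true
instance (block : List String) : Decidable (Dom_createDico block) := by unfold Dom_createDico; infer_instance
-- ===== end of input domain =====

-- B counts each distinct non-dot item by a per-key rescan (dedup + count) instead of A's
-- single accumulating dict pass; objective: idiomatic, same return value.

-- ===== PORT A =====
def createDico (block : List String) : List (String × Int) :=
  (block.foldl (fun dico item =>
    if item != "." then
      if dico.contains item then dico.modify item 0 (· + 1)
      else dico.insert item 1
    else dico) PySem.Dict.empty).items

-- ===== PORT B =====
def createDico_alt (block : List String) : List (String × Int) :=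
  ((PySem.List.dedup block).filter (fun item => item != ".")).map
    (fun item => (item, (PySem.List.count block item : Int)))

-- ===== PRECONDITION & SPEC =====
def Spec_createDico (block : List String) (out : List (String × Int)) : Prop := out = createDico_alt block
instance (block : List String) (out : List (String × Int)) : Decidable (Spec_createDico block out) := by unfold Spec_createDico; infer_instance

-- ===== CLAIM (what is proved, stated in full; the proofs are below) =====
def Claim_equal_createDico : Prop := ∀ (block : List String), Dom_createDico block → Spec_createDico block (createDico block)

-- ===== LEMMAS AND PROOFS =====

-- A's two branches are both 'modify item 0 (+1)'.
theorem stepA_eq_modify (d : PySem.Dict String Int) (item : String) :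
    (if item != "." then
      if d.contains item then d.modify item 0 (· + 1)
      else d.insert item 1
    else d)
    = (if (item != ".") then d.modify item 0 (· + 1) else d) := by
  by_cases hd : item != "." <;> simp [hd]
  by_cases hc : d.contains item
  · simp [hc]
  · have hg : d.get? item = none := by
      rw [PySem.Dict.get?_eq_none_iff_contains]; simpa using hc
    simp [PySem.Dict.modify, PySem.Dict.insert, hc, PySem.Dict.getD, hg]

-- a guarded foldl is a foldl over the filtered list
theorem foldl_filter_if {α β : Type} (p : β → Bool) (f : α → β → α) (l : List β) (a : α) :
    l.foldl (fun acc x => if p x then f acc x else acc) a = (l.filter p).foldl f a := by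
  induction l generalizing a with
  | nil => rfl
  | cons x xs ih => by_cases hp : p x <;> simp [hp, ih]

theorem add_filter {α : Type} [BEq α] [LawfulBEq α] (p : α → Bool) (acc : List α) (x : α) :
    (PySem.Set.add acc x).filter p = if p x then PySem.Set.add (acc.filter p) x else acc.filter p := by
  by_cases hm : x ∈ acc <;> by_cases hp : p x <;>
    simp [PySem.Set.add, PySem.Set.contains, hm, hp, List.mem_filter, List.filter_append]

theorem foldl_add_filter {α : Type} [BEq α] [LawfulBEq α] (p : α → Bool) (l acc : List α) :
    (l.filter p).foldl PySem.Set.add (acc.filter p) = (l.foldl PySem.Set.add acc).filter p := by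
  induction l generalizing acc with
  | nil => rfl
  | cons x xs ih => by_cases hp : p x <;> simp [hp, ← ih, add_filter]

theorem ofList_filter {α : Type} [BEq α] [LawfulBEq α] (p : α → Bool) (l : List α) :
    PySem.Set.ofList (l.filter p) = (PySem.Set.ofList l).filter p := by
  simpa [PySem.Set.ofList_eq_foldl] using foldl_add_filter p l []

theorem foldl_ext {α β : Type} (f g : α → β → α) (h : ∀ a b, f a b = g a b)
    (l : List β) (a : α) : l.foldl f a = l.foldl g a := by
  induction l generalizing a with
  | nil => rfl
  | cons x xs ih => simp only [List.foldl_cons, h, ih]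

-- ===== VERDICT (by name: the statement is the Claim_ definition above) =====
theorem createDico_spec : Claim_equal_createDico := by
  intro block _
  unfold Spec_createDico createDico createDico_alt
  rw [foldl_ext _ (fun (dico : PySem.Dict String Int) item =>
        if item != "." then dico.modify item 0 (· + 1) else dico)
      (fun d item => stepA_eq_modify d item) block PySem.Dict.empty]
  rw [foldl_filter_if (fun item => item != ".")
        (fun (d : PySem.Dict String Int) item => d.modify item 0 (· + 1)) block PySem.Dict.empty]
  rw [show (block.filter (fun item => item != ".")).foldl
        (fun d item => d.modify item 0 (· + 1)) PySem.Dict.empty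
      = PySem.Dict.counter (block.filter (fun item => item != ".")) from rfl]
  rw [PySem.Dict.items_counter, ofList_filter]
  simp only [PySem.List.dedup_eq_ofList]
  apply List.map_congr_left
  intro item hmem
  have hp : (item != ".") = true := (List.mem_filter.mp hmem).2
  have : List.count item (List.filter (fun item => item != ".") block) = List.count item block :=
    List.count_filter hp
  simp [PySem.List.count_eq, this]
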